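-- pv_equiv track=rewrite | github.com/artdotlis/BANN | bann/b_container/functions/compare_min_max.py | sort_tuple_int
-- ===== SOURCE A (Python) =====
-- from typing import Optional, final, Tuple
--
-- def sort_tuple_int(to_sort: Tuple[int, ...], /) -> Tuple[int, ...]:
--     if len(to_sort) < 2:
--         return to_sort
--     sorted_list = sorted(to_sort)
--     for s_i, fix_el in enumerate(sorted_list[1:], 1):
--         if sorted_list[s_i - 1] >= fix_el:
--             sorted_list[s_i] = sorted_list[s_i - 1] + 1
--     return tuple(sorted_list)
-- ===== SOURCE B (Python) =====
-- def sort_tuple_int(to_sort, /):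
--     # Closed form: out[i] = i + max_{j<=i}(s[j] - j) for s = sorted(to_sort).
--     # Stage 1: subtract each index; stage 2: prefix maximum; stage 3: add index back.
--     shifted = [v - i for i, v in enumerate(sorted(to_sort))]
--     pref = shifted[:1]
--     for x in shifted[1:]:
--         pref.append(max(pref[-1], x))
--     return tuple(i + m for i, m in enumerate(pref))
-- ===== Notes on version B (the rewrite author's own statement) =====
-- stated objective: alternative
-- what changed: Replaces A's sort-then-rewrite loop (overwrite each non-increasing element with previous+1) by the closed form out[i] = i + max_{j<=i}(sorted[j]-j), computed in three staged passes: subtract indices, take a running prefix maximum, add indices back.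
import Mathlib
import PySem

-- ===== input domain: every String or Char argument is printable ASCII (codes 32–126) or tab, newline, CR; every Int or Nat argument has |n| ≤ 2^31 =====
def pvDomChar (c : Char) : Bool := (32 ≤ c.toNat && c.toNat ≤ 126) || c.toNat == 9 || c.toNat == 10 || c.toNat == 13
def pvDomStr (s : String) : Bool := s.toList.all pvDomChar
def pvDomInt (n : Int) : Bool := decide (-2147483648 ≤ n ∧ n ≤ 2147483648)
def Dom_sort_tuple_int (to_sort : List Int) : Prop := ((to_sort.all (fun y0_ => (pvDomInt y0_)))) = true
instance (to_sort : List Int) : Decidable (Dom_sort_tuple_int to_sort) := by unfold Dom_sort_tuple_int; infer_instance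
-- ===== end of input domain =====

-- B replaces A's in-place rewrite loop by the closed form out[i] = i + max_{j<=i}(sorted[j]-j),
-- computed in three staged passes (objective: alternative).

-- ===== PORT A =====
-- the for-loop over enumerate(sorted_list[1:], 1) mutating sorted_list in place
def pvALoop (l : List Int) : List (Int × Int) → List Int
  | [] => l
  | (i, fx) :: rest =>
      -- sorted_list[s_i - 1] read on the CURRENT (mutated) list; index always in range
      let prev := PySem.List.pyGetD l (i - 1) 0
      let l' := if prev ≥ fx then PySem.List.pySetD l i (prev + 1) else l
      pvALoop l' rest

def sort_tuple_int (to_sort : List Int) : List Int :=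
  if to_sort.length < 2 then to_sort
  else
    let sl := PySem.List.sorted to_sort id false
    pvALoop sl (PySem.List.enumerate (PySem.List.slice sl (some 1) none) 1)

-- ===== PORT B =====
-- the 'for x in shifted[1:]' loop: threads the last prefix maximum (pref[-1])
def pvPrefLoop (last : Int) : List Int → List Int
  | [] => []
  | x :: t => let m := max last x; m :: pvPrefLoop m t

def sort_tuple_int_alt (to_sort : List Int) : List Int :=
  let shifted := (PySem.List.enumerate (PySem.List.sorted to_sort id false) 0).map
    (fun p => p.2 - p.1)
  let pref := match shifted with
    | [] => []                      -- shifted[:1] = [] and the loop runs zero times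
    | x :: t => x :: pvPrefLoop x t
  (PySem.List.enumerate pref 0).map (fun p => p.1 + p.2)

-- ===== PRECONDITION & SPEC =====
def Spec_sort_tuple_int (to_sort : List Int) (out : List Int) : Prop := out = sort_tuple_int_alt to_sort
instance (to_sort : List Int) (out : List Int) : Decidable (Spec_sort_tuple_int to_sort out) := by unfold Spec_sort_tuple_int; infer_instance

-- ===== CLAIM (what is proved, stated in full; the proofs are below) =====
def Claim_equal_sort_tuple_int : Prop := ∀ (to_sort : List Int), Dom_sort_tuple_int to_sort → Spec_sort_tuple_int to_sort (sort_tuple_int to_sort)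

-- ===== LEMMAS AND PROOFS =====

-- the reference scan both programs compute after the first element
def pvScan (a : Int) : List Int → List Int
  | [] => []
  | b :: t =>
      let c := if b > a then b else a + 1
      c :: pvScan c t

lemma pvA_loop_scan (rest : List Int) : ∀ (q : List Int) (a : Int),
    pvALoop (q ++ a :: rest) (PySem.List.enumerate rest ((q.length : Int) + 1))
      = q ++ a :: pvScan a rest := by
  induction rest with
  | nil => intro q a; simp [pvALoop, pvScan, PySem.List.enumerate]
  | cons b t ih =>
      intro q a
      rw [PySem.List.enumerate_cons]
      simp only [pvALoop]
      have h1 : ((q.length : Int) + 1) - 1 = (q.length : Int) := by ring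
      have hprev : PySem.List.pyGetD (q ++ a :: b :: t) (((q.length : Int) + 1) - 1) 0 = a := by
        rw [h1, PySem.List.pyGetD_natCast]
        simp [List.getD]
      rw [hprev]
      by_cases h : a ≥ b
      · have hpos : ¬ b > a := by omega
        rw [if_pos h]
        have h2 : (q.length : Int) + 1 = ((q.length + 1 : Nat) : Int) := by push_cast; ring
        rw [h2, PySem.List.pySetD_natCast]
        have hset : (q ++ a :: b :: t).set (q.length + 1) (a + 1)
            = (q ++ [a]) ++ (a + 1) :: t := by simp
        rw [hset]
        have hih := ih (q ++ [a]) (a + 1)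
        have h3 : (((q ++ [a]).length : Nat) : Int) + 1 = ((q.length + 1 : Nat) : Int) + 1 := by
          simp
        rw [h3] at hih
        rw [hih]
        simp only [pvScan, if_neg hpos, List.append_assoc, List.singleton_append]
      · have hpos : b > a := by omega
        rw [if_neg h]
        have hih := ih (q ++ [a]) b
        have h3 : (((q ++ [a]).length : Nat) : Int) + 1 = ((q.length : Int) + 1) + 1 := by
          simp
        rw [h3] at hih
        simp only [List.append_assoc, List.singleton_append] at hih
        rw [hih]
        simp only [pvScan, if_pos hpos]

-- shift-by-index / prefix-max / shift-back equals the scan, generalized over start index and running max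
lemma pvB_pref_scan (xs : List Int) : ∀ (i m : Int),
    (PySem.List.enumerate
        (pvPrefLoop m ((PySem.List.enumerate xs i).map (fun p => p.2 - p.1))) i).map
      (fun p => p.1 + p.2) = pvScan (m + i - 1) xs := by
  induction xs with
  | nil => intro i m; simp [pvScan, pvPrefLoop, PySem.List.enumerate]
  | cons b t ih =>
      intro i m
      rw [PySem.List.enumerate_cons]
      simp only [List.map_cons, pvPrefLoop]
      rw [PySem.List.enumerate_cons]
      simp only [List.map_cons, pvScan]
      have hih := ih (i + 1) (max m (b - i))
      have harg : max m (b - i) + (i + 1) - 1 = if b > m + i - 1 then b else (m + i - 1) + 1 := by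
        split_ifs <;> omega
      rw [hih, harg]
      congr 1
      split_ifs with h <;> omega

lemma pv_eq_on_sorted (to_sort : List Int) :
    sort_tuple_int to_sort = sort_tuple_int_alt to_sort := by
  unfold sort_tuple_int sort_tuple_int_alt
  by_cases hlen : to_sort.length < 2
  · rw [if_pos hlen]
    match hto : to_sort, hlen with
    | [], _ => simp [PySem.List.sorted]
    | [x], _ =>
        simp [PySem.List.sorted, PySem.List.insertBy, PySem.List.enumerate, pvPrefLoop]
  · rw [if_neg hlen]
    have hlen2 : (PySem.List.sorted to_sort id false).length = to_sort.length :=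
      PySem.List.length_sorted to_sort id false
    match hs : PySem.List.sorted to_sort id false with
    | [] => rw [hs] at hlen2; simp at hlen2; omega
    | x :: xs =>
        show pvALoop (x :: xs)
            (PySem.List.enumerate (PySem.List.slice (x :: xs) (some 1) none) 1) = _
        rw [PySem.List.slice_from_one]
        simp only [List.tail_cons]
        have hA := pvA_loop_scan xs [] x
        simp only [List.nil_append, List.length_nil, Nat.cast_zero, zero_add] at hA
        rw [hA]
        rw [PySem.List.enumerate_cons]
        simp only [List.map_cons]
        rw [PySem.List.enumerate_cons]
        simp only [List.map_cons]
        have hB := pvB_pref_scan xs 1 (x - 0)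
        simp only [zero_add]
        rw [hB]
        norm_num

-- ===== VERDICT (by name: the statement is the Claim_ definition above) =====
theorem sort_tuple_int_spec : Claim_equal_sort_tuple_int := by
  intro to_sort _
  unfold Spec_sort_tuple_int
  exact pv_eq_on_sorted to_sort
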